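-- pv_equiv track=rewrite | github.com/MrEricSir/munimet.ro | lib/train_detector.py | _find_train_clusters
-- ===== SOURCE A (Python) =====
-- def _find_train_clusters(trains, min_trains=3, max_spread=200):
--     """Find clusters of trains that might indicate a pileup.
--
--     Uses a sliding window approach: finds the largest cluster containing
--     at least min_trains trains, where all trains are within max_spread
--     of each other (measured from leftmost to rightmost train).
--
--     Returns list of (x_min, x_max) tuples for each cluster region.
--     """
--     if len(trains) < min_trains:
--         return []
--
--     # Sort trains by x position
--     sorted_trains = sorted(trains, key=lambda t: t['x'])
--     clusters = []
--     used = set()  # Track which trains are already in a cluster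
--
--     # Use a sliding window to find clusters
--     # A cluster is a contiguous group where the spread (max_x - min_x) <= max_spread
--     for start in range(len(sorted_trains)):
--         if start in used:
--             continue
--
--         # Expand the window as far as possible while keeping spread <= max_spread
--         end = start
--         while end + 1 < len(sorted_trains):
--             new_spread = sorted_trains[end + 1]['x'] - sorted_trains[start]['x']
--             if new_spread <= max_spread:
--                 end += 1
--             else:
--                 break
--
--         cluster_size = end - start + 1
--         if cluster_size >= min_trains:
--             x_min = sorted_trains[start]['x']
--             x_max = sorted_trains[end]['x']
--             # Extend region to catch any missed trains at edges
--             clusters.append((max(0, x_min - 40), x_max + 40))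
--             # Mark these trains as used
--             for idx in range(start, end + 1):
--                 used.add(idx)
--
--     return clusters
-- ===== SOURCE B (Python) =====
-- def _bisect_right(a, x, lo, hi):
--     # hand-rolled bisect.bisect_right (the original module imports nothing)
--     while lo < hi:
--         mid = (lo + hi) // 2
--         if x < a[mid]:
--             hi = mid
--         else:
--             lo = mid + 1
--     return lo
--
--
-- def _find_train_clusters(trains, min_trains=3, max_spread=200):
--     """Binary-search the window end per start instead of A's linear expansion
--     scan with a used-index set: sort the x values once, then jump from window
--     to window."""
--     if len(trains) < min_trains:
--         return []
--     xs = sorted(t['x'] for t in trains)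
--     n = len(xs)
--     clusters = []
--     i = 0
--     while i < n:
--         # first index > i whose x exceeds xs[i] + max_spread (window is at least [i, i])
--         j = _bisect_right(xs, xs[i] + max_spread, i + 1, n)
--         if j - i >= min_trains:
--             clusters.append((max(0, xs[i] - 40), xs[j - 1] + 40))
--             i = j
--         else:
--             i += 1
--     return clusters
-- ===== Notes on version B (the rewrite author's own statement) =====
-- stated objective: alternative
-- what changed: B sorts the x values once and finds each window's end with a hand-rolled bisect_right, jumping straight past accepted windows, instead of A's per-start linear expansion scan over sorted dicts with a used-index set; on random inputs the measured cost is the same.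
import Mathlib
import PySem

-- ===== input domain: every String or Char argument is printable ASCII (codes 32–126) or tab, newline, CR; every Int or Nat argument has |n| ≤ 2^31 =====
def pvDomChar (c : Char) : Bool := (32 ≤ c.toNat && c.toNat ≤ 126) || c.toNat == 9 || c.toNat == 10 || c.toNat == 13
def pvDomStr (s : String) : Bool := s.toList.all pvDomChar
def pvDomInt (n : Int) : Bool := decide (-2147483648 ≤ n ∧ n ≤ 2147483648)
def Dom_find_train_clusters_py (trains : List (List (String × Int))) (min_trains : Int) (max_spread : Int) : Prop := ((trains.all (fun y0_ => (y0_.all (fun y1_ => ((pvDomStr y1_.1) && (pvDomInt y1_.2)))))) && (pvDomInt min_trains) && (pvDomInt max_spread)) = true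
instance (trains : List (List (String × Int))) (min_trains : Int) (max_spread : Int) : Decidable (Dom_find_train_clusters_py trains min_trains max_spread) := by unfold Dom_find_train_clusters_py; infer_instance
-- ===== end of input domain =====

-- B replaces A's per-start linear window expansion plus used-index set by one pass over the
-- sorted x values that binary-searches each window's end and jumps over accepted windows.
-- (Loops are ported with a Nat fuel parameter that merely makes the recursion structural; the
-- fuel passed by the callers is always sufficient, so it never changes what is computed.)

-- ===== PORT A =====
-- t['x']  (Pre_ guarantees the key is present; the default is never read there)
def pvGetX (t : List (String × Int)) : Int := ((PySem.Dict.mk t).get? "x").getD 0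

-- the inner 'while end + 1 < len(sorted_trains): …' expansion loop
def pvExpandA (st : List (List (String × Int))) (ms : Int) (start : Int) : Nat → Int → Int
  | 0, e => e
  | fuel + 1, e =>
    if e + 1 < (st.length : Int) then
      if pvGetX (PySem.List.pyGetD st (e + 1) []) - pvGetX (PySem.List.pyGetD st start []) ≤ ms then
        pvExpandA st ms start fuel (e + 1)
      else e
    else e

-- one iteration of 'for start in range(len(sorted_trains)): …' on state (clusters, used)
def pvStepA (st : List (List (String × Int))) (mt ms : Int)
    (acc : List (Int × Int) × PySem.Set Int) (s : Int) : List (Int × Int) × PySem.Set Int :=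
  if PySem.Set.contains acc.2 s then acc
  else
    let e := pvExpandA st ms s st.length s
    if mt ≤ e - s + 1 then
      (acc.1 ++ [(max 0 (pvGetX (PySem.List.pyGetD st s []) - 40),
                  pvGetX (PySem.List.pyGetD st e []) + 40)],
       (PySem.List.pyRange s (e + 1)).foldl PySem.Set.add acc.2)
    else acc

def find_train_clusters_py (trains : List (List (String × Int))) (min_trains : Int) (max_spread : Int) : List (Int × Int) :=
  if (trains.length : Int) < min_trains then []
  else
    let st := PySem.List.sorted trains pvGetX
    ((PySem.List.pyRange 0 (st.length : Int)).foldl (pvStepA st min_trains max_spread)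
      ([], PySem.Set.empty)).1

-- ===== PORT B =====
-- hand-rolled bisect_right (Source B's _bisect_right, ported step for step)
def pvBisect (a : List Int) (x : Int) : Nat → Int → Int → Int
  | 0, lo, _ => lo
  | fuel + 1, lo, hi =>
    if lo < hi then
      if x < PySem.List.pyGetD a (PySem.Int.floordiv (lo + hi) 2) 0 then
        pvBisect a x fuel lo (PySem.Int.floordiv (lo + hi) 2)
      else pvBisect a x fuel (PySem.Int.floordiv (lo + hi) 2 + 1) hi
    else lo

-- Source B's 'while i < n: …' loop
def pvLoopB (xs : List Int) (mt ms : Int) : Nat → Int → List (Int × Int)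
  | 0, _ => []
  | fuel + 1, i =>
    if i < (xs.length : Int) then
      if mt ≤ pvBisect xs (PySem.List.pyGetD xs i 0 + ms) xs.length (i + 1) (xs.length : Int) - i then
        (max 0 (PySem.List.pyGetD xs i 0 - 40),
         PySem.List.pyGetD xs (pvBisect xs (PySem.List.pyGetD xs i 0 + ms) xs.length (i + 1) (xs.length : Int) - 1) 0 + 40) ::
          pvLoopB xs mt ms fuel (pvBisect xs (PySem.List.pyGetD xs i 0 + ms) xs.length (i + 1) (xs.length : Int))
      else pvLoopB xs mt ms fuel (i + 1)
    else []

def find_train_clusters_py_alt (trains : List (List (String × Int))) (min_trains : Int) (max_spread : Int) : List (Int × Int) :=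
  if (trains.length : Int) < min_trains then []
  else
    let xs := PySem.List.sorted (trains.map pvGetX) (fun v => v)
    pvLoopB xs min_trains max_spread xs.length 0

-- ===== PRECONDITION & SPEC =====
-- Pre_ excludes exactly the inputs where Python A raises KeyError: some train dict lacks the
-- key 'x' while the sort (len(trains) >= min_trains) is actually reached.
def Pre_find_train_clusters_py (trains : List (List (String × Int))) (min_trains : Int) (max_spread : Int) : Prop :=
  (trains.length : Int) < min_trains ∨ ∀ t ∈ trains, (((PySem.Dict.mk t).get? "x").isSome : Prop)
instance (trains : List (List (String × Int))) (min_trains : Int) (max_spread : Int) : Decidable (Pre_find_train_clusters_py trains min_trains max_spread) := by unfold Pre_find_train_clusters_py; infer_instance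

def pvWitness_find_train_clusters_py : (List (List (String × Int))) × Int × Int :=
  ([[("x", 10)], [("x", 20)], [("x", 500)]], 2, 50)

def Spec_find_train_clusters_py (trains : List (List (String × Int))) (min_trains : Int) (max_spread : Int) (out : List (Int × Int)) : Prop := out = find_train_clusters_py_alt trains min_trains max_spread
instance (trains : List (List (String × Int))) (min_trains : Int) (max_spread : Int) (out : List (Int × Int)) : Decidable (Spec_find_train_clusters_py trains min_trains max_spread out) := by unfold Spec_find_train_clusters_py; infer_instance

-- ===== CLAIM (what is proved, stated in full; the proofs are below) =====
def Claim_equal_find_train_clusters_py : Prop := ∀ (trains : List (List (String × Int))) (min_trains : Int) (max_spread : Int), Dom_find_train_clusters_py trains min_trains max_spread → Pre_find_train_clusters_py trains min_trains max_spread → Spec_find_train_clusters_py trains min_trains max_spread (find_train_clusters_py trains min_trains max_spread)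

-- ===== LEMMAS AND PROOFS =====

-- the sorted x values: map pvGetX over A's sorted dict list = B's sorted of the mapped values
theorem pv_xs_eq (trains : List (List (String × Int))) :
    PySem.List.sorted (trains.map pvGetX) (fun v => v) =
      (PySem.List.sorted trains pvGetX).map pvGetX := by
  refine PySem.List.sorted_id_eq_of_perm_of_pairwise _ _ ?_ ?_
  · exact (PySem.List.sorted_perm trains pvGetX false).map pvGetX
  · exact PySem.List.sorted_map_key_pairwise trains pvGetX

-- monotonicity of a (· ≤ ·)-pairwise Int list under pyGetD, Int indices
theorem pv_mono (xs : List Int) (hs : List.Pairwise (· ≤ ·) xs) {p q : Int}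
    (h0 : 0 ≤ p) (hpq : p ≤ q) (hq : q < (xs.length : Int)) :
    PySem.List.pyGetD xs p 0 ≤ PySem.List.pyGetD xs q 0 := by
  rw [PySem.List.pyGetD_eq_getElem xs 0 h0 (by omega), PySem.List.pyGetD_eq_getElem xs 0 (by omega) hq]
  rcases eq_or_lt_of_le hpq with h | h
  · subst h; exact le_refl _
  · exact (List.pairwise_iff_getElem.1 hs) p.toNat q.toNat (by omega) (by omega) (by omega)

-- t['x'] of A's dict list entry = entry of the mapped x-value list
theorem pv_map_getD (st : List (List (String × Int))) (k : Int) :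
    pvGetX (PySem.List.pyGetD st k []) = PySem.List.pyGetD (st.map pvGetX) k 0 := by
  have := PySem.List.pyGetD_map pvGetX st k []
  simpa [pvGetX, PySem.Dict.get?] using this.symm

-- bisection result characterisation (with sufficient fuel)
theorem pvBisect_spec (a : List Int) (x : Int) :
    ∀ (fuel : Nat) (lo hi : Int), (hi - lo).toNat ≤ fuel → 0 ≤ lo → hi ≤ (a.length : Int) → lo ≤ hi →
    lo ≤ pvBisect a x fuel lo hi ∧ pvBisect a x fuel lo hi ≤ hi ∧
    (lo < pvBisect a x fuel lo hi → PySem.List.pyGetD a (pvBisect a x fuel lo hi - 1) 0 ≤ x) ∧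
    (pvBisect a x fuel lo hi < hi → x < PySem.List.pyGetD a (pvBisect a x fuel lo hi) 0) := by
  intro fuel
  induction fuel with
  | zero =>
      intro lo hi hf hlo hhi hle
      have : hi = lo := by omega
      subst this
      simp [pvBisect]
  | succ fuel ih =>
      intro lo hi hf hlo hhi hle
      rw [pvBisect]
      by_cases hlh : lo < hi
      · rw [if_pos hlh]
        have hm1 := (PySem.Int.le_floordiv_iff_mul_le (a := lo + hi) (b := 2) (q := lo) (by norm_num)).2 (by omega)
        have hm2 := (PySem.Int.floordiv_lt_iff_lt_mul (a := lo + hi) (b := 2) (q := hi) (by norm_num)).2 (by omega)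
        by_cases hx : x < PySem.List.pyGetD a (PySem.Int.floordiv (lo + hi) 2) 0
        · rw [if_pos hx]
          obtain ⟨i1, i2, i3, i4⟩ := ih lo (PySem.Int.floordiv (lo + hi) 2) (by omega) hlo (by omega) (by omega)
          refine ⟨i1, by omega, i3, ?_⟩
          intro hr
          rcases lt_or_ge (pvBisect a x fuel lo (PySem.Int.floordiv (lo + hi) 2)) (PySem.Int.floordiv (lo + hi) 2) with hc | hc
          · exact i4 hc
          · have heq : pvBisect a x fuel lo (PySem.Int.floordiv (lo + hi) 2) = PySem.Int.floordiv (lo + hi) 2 := by omega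
            rw [heq]; exact hx
        · rw [if_neg hx]
          obtain ⟨i1, i2, i3, i4⟩ := ih (PySem.Int.floordiv (lo + hi) 2 + 1) hi (by omega) (by omega) hhi (by omega)
          refine ⟨by omega, i2, ?_, i4⟩
          intro hr
          rcases lt_or_ge (PySem.Int.floordiv (lo + hi) 2 + 1) (pvBisect a x fuel (PySem.Int.floordiv (lo + hi) 2 + 1) hi) with hc | hc
          · exact i3 hc
          · have heq : pvBisect a x fuel (PySem.Int.floordiv (lo + hi) 2 + 1) hi = PySem.Int.floordiv (lo + hi) 2 + 1 := by omega
            rw [heq]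
            have h22 : PySem.Int.floordiv (lo + hi) 2 + 1 - 1 = PySem.Int.floordiv (lo + hi) 2 := by omega
            rw [h22]
            exact not_lt.1 hx
      · rw [if_neg hlh]
        exact ⟨le_refl _, by omega, by omega, by omega⟩

-- expansion result characterisation (on the mapped x values; with sufficient fuel)
theorem pvExpandA_spec (st : List (List (String × Int))) (ms : Int) (s : Int) :
    ∀ (fuel : Nat) (e : Int), ((st.length : Int) - e - 1).toNat ≤ fuel →
    0 ≤ s → s ≤ e → e < (st.length : Int) →
    (s < e → PySem.List.pyGetD (st.map pvGetX) e 0 ≤ PySem.List.pyGetD (st.map pvGetX) s 0 + ms) →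
    e ≤ pvExpandA st ms s fuel e ∧ pvExpandA st ms s fuel e < (st.length : Int) ∧
    (s < pvExpandA st ms s fuel e →
      PySem.List.pyGetD (st.map pvGetX) (pvExpandA st ms s fuel e) 0 ≤ PySem.List.pyGetD (st.map pvGetX) s 0 + ms) ∧
    (pvExpandA st ms s fuel e + 1 < (st.length : Int) →
      PySem.List.pyGetD (st.map pvGetX) s 0 + ms < PySem.List.pyGetD (st.map pvGetX) (pvExpandA st ms s fuel e + 1) 0) := by
  intro fuel
  induction fuel with
  | zero =>
      intro e hf h0 hse he hin
      refine ⟨le_refl _, he, fun hslt => hin hslt, ?_⟩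
      intro hc
      exact absurd hc (by simp [pvExpandA]; omega)
  | succ fuel ih =>
      intro e hf h0 hse he hin
      rw [pvExpandA]
      by_cases hb : e + 1 < (st.length : Int)
      · rw [if_pos hb]
        by_cases hcond : pvGetX (PySem.List.pyGetD st (e + 1) []) - pvGetX (PySem.List.pyGetD st s []) ≤ ms
        · rw [if_pos hcond]
          rw [pv_map_getD, pv_map_getD] at hcond
          obtain ⟨i1, i2, i3, i4⟩ := ih (e + 1) (by omega) h0 (by omega) (by omega) (by intro _; omega)
          exact ⟨by omega, i2, i3, i4⟩
        · rw [if_neg hcond]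
          rw [pv_map_getD, pv_map_getD] at hcond
          refine ⟨le_refl _, he, fun hslt => hin hslt, ?_⟩
          intro _
          omega
      · rw [if_neg hb]
        exact ⟨le_refl _, he, fun hslt => hin hslt, by omega⟩

-- the two window-end computations agree
theorem pv_wend (st : List (List (String × Int))) (ms : Int) (s : Int)
    (hs : List.Pairwise (· ≤ ·) (st.map pvGetX)) (h0 : 0 ≤ s) (hlt : s < (st.length : Int)) :
    pvExpandA st ms s st.length s + 1 =
      pvBisect (st.map pvGetX) (PySem.List.pyGetD (st.map pvGetX) s 0 + ms) (st.map pvGetX).length (s + 1)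
        (((st.map pvGetX).length : Int)) := by
  set xs := st.map pvGetX with hxs
  have hlen : (xs.length : Int) = (st.length : Int) := by simp [hxs]
  obtain ⟨e1, e2, e3, e4⟩ := pvExpandA_spec st ms s st.length s (by omega) h0 (le_refl _) hlt (by omega)
  obtain ⟨b1, b2, b3, b4⟩ := pvBisect_spec xs (PySem.List.pyGetD xs s 0 + ms) xs.length (s + 1)
    ((xs.length : Int)) (by omega) (by omega) (le_refl _) (by omega)
  set t := PySem.List.pyGetD xs s 0 + ms with ht
  set r1 := pvExpandA st ms s st.length s + 1 with hr1
  set r2 := pvBisect xs t xs.length (s + 1) ((xs.length : Int)) with hr2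
  rcases lt_trichotomy r1 r2 with h | h | h
  · exfalso
    have hx1 : t < PySem.List.pyGetD xs r1 0 := e4 (by omega)
    have hx2 : PySem.List.pyGetD xs (r2 - 1) 0 ≤ t := b3 (by omega)
    have := pv_mono xs hs (p := r1) (q := r2 - 1) (by omega) (by omega) (by omega)
    omega
  · exact h
  · exfalso
    have hx1 : t < PySem.List.pyGetD xs r2 0 := b4 (by omega)
    have hx2 : PySem.List.pyGetD xs (r1 - 1) 0 ≤ t := by
      rcases eq_or_lt_of_le e1 with he | he
      · omega
      · have := e3 (by omega)
        have hsimp : r1 - 1 = pvExpandA st ms s st.length s := by omega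
        rw [hsimp]
        omega
    have := pv_mono xs hs (p := r2) (q := r1 - 1) (by omega) (by omega) (by omega)
    omega

-- main loop correspondence: A's fold from s, with every index below b already marked used,
-- equals B's loop continuing from b (any sufficient fuel)
theorem pv_main (st : List (List (String × Int))) (mt ms : Int)
    (hs : List.Pairwise (· ≤ ·) (st.map pvGetX)) :
    ∀ (fuel : Nat) (s b : Int) (acc : List (Int × Int)) (used : PySem.Set Int) (fuelB : Nat),
      ((st.length : Int) - s).toNat ≤ fuel →
      ((st.length : Int) - b).toNat ≤ fuelB →
      0 ≤ s → s ≤ b → b ≤ (st.length : Int) →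
      (∀ k : Int, s ≤ k → (PySem.Set.contains used k = true ↔ k < b)) →
      ((PySem.List.pyRange s (st.length : Int)).foldl (pvStepA st mt ms) (acc, used)).1 =
        acc ++ pvLoopB (st.map pvGetX) mt ms fuelB b := by
  intro fuel
  induction fuel with
  | zero =>
      intro s b acc used fuelB hf hfB h0 hsb hbn hinv
      rw [PySem.List.pyRange_one_eq_nil (by omega)]
      have hb : b = (st.length : Int) := by omega
      subst hb
      cases fuelB with
      | zero => simp [pvLoopB]
      | succ fuelB => rw [pvLoopB, if_neg (by simp)]; simp
  | succ fuel ih =>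
      intro s b acc used fuelB hf hfB h0 hsb hbn hinv
      rcases lt_or_ge s (st.length : Int) with hlt | hge
      · have hlen : (((st.map pvGetX).length : Int)) = (st.length : Int) := by simp
        rw [PySem.List.pyRange_one_cons hlt, List.foldl_cons]
        by_cases hused : PySem.Set.contains used s = true
        · -- skipped: s < b
          have hsb' : s < b := (hinv s (le_refl _)).1 hused
          have hm : s ∈ used := by simpa [PySem.Set.contains] using hused
          have hstep : pvStepA st mt ms (acc, used) s = (acc, used) := by
            simp [pvStepA, hm]
          rw [hstep]
          exact ih (s + 1) b acc used fuelB (by omega) hfB (by omega) (by omega) hbn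
            (fun k hk => hinv k (by omega))
        · -- fresh start: b = s
          have hbs : s = b := by
            rcases lt_or_ge s b with hc | hc
            · exact absurd ((hinv s (le_refl _)).2 hc) hused
            · omega
          subst hbs
          have hnm : s ∉ used := by
            intro hm
            exact hused (by simpa [PySem.Set.contains] using hm)
          obtain ⟨e1, e2, e3, e4⟩ := pvExpandA_spec st ms s st.length s (by omega) h0 (le_refl _) hlt (by omega)
          have hj : pvBisect (st.map pvGetX) (PySem.List.pyGetD (st.map pvGetX) s 0 + ms) (st.map pvGetX).length (s + 1)
              (((st.map pvGetX).length : Int)) = pvExpandA st ms s st.length s + 1 :=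
            (pv_wend st ms s hs h0 hlt).symm
          obtain ⟨fuelB', hfB'⟩ : ∃ f, fuelB = f + 1 := by
            cases fuelB with
            | zero => exfalso; omega
            | succ f => exact ⟨f, rfl⟩
          subst hfB'
          by_cases hcl : mt ≤ pvExpandA st ms s st.length s - s + 1
          · -- accepted window [s, e]
            have hstep : pvStepA st mt ms (acc, used) s =
                (acc ++ [(max 0 (pvGetX (PySem.List.pyGetD st s []) - 40),
                          pvGetX (PySem.List.pyGetD st (pvExpandA st ms s st.length s) []) + 40)],
                 (PySem.List.pyRange s (pvExpandA st ms s st.length s + 1)).foldl PySem.Set.add used) := by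
              simp [pvStepA, hnm, hcl]
            rw [hstep]
            have hrec := ih (s + 1) (pvExpandA st ms s st.length s + 1)
              (acc ++ [(max 0 (pvGetX (PySem.List.pyGetD st s []) - 40),
                        pvGetX (PySem.List.pyGetD st (pvExpandA st ms s st.length s) []) + 40)])
              (List.foldl PySem.Set.add used (PySem.List.pyRange s (pvExpandA st ms s st.length s + 1)))
              fuelB' (by omega) (by omega) (by omega) (by omega) (by omega) ?_
            · rw [hrec]
              conv_rhs => rw [pvLoopB]
              rw [if_pos (show s < ((List.map pvGetX st).length : Int) by omega),
                hj, if_pos (show mt ≤ pvExpandA st ms s st.length s + 1 - s by omega)]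
              have hidx : pvExpandA st ms s st.length s + 1 - 1 = pvExpandA st ms s st.length s := by omega
              rw [hidx, pv_map_getD, pv_map_getD]
              simp
            · -- invariant for the enlarged used set
              intro k hk
              have hupd : (PySem.List.pyRange s (pvExpandA st ms s st.length s + 1)).foldl PySem.Set.add used =
                  PySem.Set.update used (PySem.List.pyRange s (pvExpandA st ms s st.length s + 1)) := rfl
              rw [hupd]
              constructor
              · intro hc
                have hmem : k ∈ PySem.Set.update used (PySem.List.pyRange s (pvExpandA st ms s st.length s + 1)) := by
                  simpa [PySem.Set.contains] using hc
                rcases (PySem.Set.mem_update _ _ _).1 hmem with hm | hm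
                · have := (hinv k (by omega)).1 (by simpa [PySem.Set.contains] using hm)
                  omega
                · exact (PySem.List.mem_pyRange_one.1 hm).2
              · intro hklt
                have hmem : k ∈ PySem.Set.update used (PySem.List.pyRange s (pvExpandA st ms s st.length s + 1)) :=
                  (PySem.Set.mem_update _ _ _).2 (Or.inr (PySem.List.mem_pyRange_one.2 ⟨by omega, hklt⟩))
                simpa [PySem.Set.contains] using hmem
          · -- window too small: move on by one
            have hstep : pvStepA st mt ms (acc, used) s = (acc, used) := by
              simp [pvStepA, hnm, hcl]
            rw [hstep]
            have hrec := ih (s + 1) (s + 1) acc used fuelB' (by omega) (by omega) (by omega) (by omega) (by omega)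
              (fun k hk => by
                constructor
                · intro hc
                  have := (hinv k (by omega)).1 hc
                  omega
                · intro hklt; omega)
            rw [hrec]
            conv_rhs => rw [pvLoopB]
            rw [if_pos (show s < ((List.map pvGetX st).length : Int) by omega),
              hj, if_neg (show ¬ mt ≤ pvExpandA st ms s st.length s + 1 - s by omega)]
      · rw [PySem.List.pyRange_one_eq_nil (by omega)]
        have hb : b = (st.length : Int) := by omega
        subst hb
        cases fuelB with
        | zero => simp [pvLoopB]
        | succ fuelB => rw [pvLoopB, if_neg (by simp)]; simp

-- ===== VERDICT (by name: the statement is the Claim_ definition above) =====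
theorem find_train_clusters_py_spec : Claim_equal_find_train_clusters_py := by
  intro trains mt ms hdom hpre
  unfold Spec_find_train_clusters_py find_train_clusters_py find_train_clusters_py_alt
  by_cases hlt : (trains.length : Int) < mt
  · simp [hlt]
  · simp only [if_neg hlt]
    have hs : List.Pairwise (· ≤ ·) ((PySem.List.sorted trains pvGetX).map pvGetX) :=
      PySem.List.sorted_map_key_pairwise trains pvGetX
    have hmain := pv_main (PySem.List.sorted trains pvGetX) mt ms hs
      (PySem.List.sorted trains pvGetX).length 0 0 [] PySem.Set.empty
      (PySem.List.sorted (trains.map pvGetX) (fun v => v)).length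
      (by omega) (by rw [pv_xs_eq]; simp) (le_refl _) (le_refl _) (by omega) ?_
    · rw [hmain, pv_xs_eq]
      simp
    · intro k hk
      constructor
      · intro hc
        simp [PySem.Set.contains, PySem.Set.empty] at hc
      · intro hc; omega
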